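-- pv_equiv track=rewrite | github.com/Henry280000/Backend_1 | Documents/Programacion/Python/main.py | direccion_final
-- ===== SOURCE A (Python) =====
-- def matriz_vacia(filas, columnas):
--     #matriz creada para llevar el conteo de las casillas visitadas
--     matriz = []
--     for f in range(filas):
--         fila_nueva = []
--         for c in range(columnas):
--             fila_nueva.append(False)
--         matriz.append(fila_nueva)
--     return matriz
--
-- def girar_derecha(direccion_actual):
--     if direccion_actual == "DERECHA":
--         return "ABAJO"
--     elif direccion_actual == "ABAJO":
--         return "IZQUIERDA"
--     elif direccion_actual == "IZQUIERDA":
--         return "ARRIBA"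
--     elif direccion_actual == "ARRIBA":
--         return "DERECHA"
--
-- def calcular_siguiente_paso(fila_actual, col_actual, direccion):
--     nueva_fila = fila_actual
--     nueva_col = col_actual
--
--     if direccion == "DERECHA":
--         nueva_col = nueva_col + 1
--     elif direccion == "ABAJO":
--         nueva_fila = nueva_fila + 1
--     elif direccion == "IZQUIERDA":
--         nueva_col = nueva_col - 1
--     elif direccion == "ARRIBA":
--         nueva_fila = nueva_fila - 1
--
--     return (nueva_fila, nueva_col)
--
-- def validacion(fila, col, max_filas, max_cols):
--     if fila < 0 or fila >= max_filas:
--         return False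
--     if col < 0 or col >= max_cols:
--         return False
--
--     return True
--
-- def movimiento_valido(fila, col, max_filas, max_cols, visitados):
--     if not validacion(fila, col, max_filas, max_cols):
--         return False
--
--     if visitados[fila][col] == True:
--         return False
--
--     return True
--
-- def direccion_final(N, M):
--     # validación inicial de dimensiones
--     if N <= 0 or M <= 0:
--         return "Dimensiones no válidas"
--
--     fila_actual = 0
--     col_actual = 0
--     direccion_actual = "DERECHA" # empezamos hacia la derecha
--
--     visitados = matriz_vacia(N, M)
--
--     total_casillas = N * M
--     casillas_visitadas_contador = 0
--
--     # bucle principal, el cual se ejecuta si no hemos visitado todas las casillas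
--     while casillas_visitadas_contador < total_casillas:
--
--         # revisamos la casilla actual
--         if visitados[fila_actual][col_actual] == False:
--             visitados[fila_actual][col_actual] = True
--             casillas_visitadas_contador = casillas_visitadas_contador + 1
--         # si ya se visitaron todas las casillas, salimos del bucle
--         if casillas_visitadas_contador == total_casillas:
--             break
--
--         # primero, calculamos a donde iríamos si seguimos recto
--         (siguiente_fila, siguiente_col) = calcular_siguiente_paso(fila_actual, col_actual, direccion_actual)
--
--         # comprobamos si es valido ese movimiento
--         if movimiento_valido(siguiente_fila, siguiente_col, N, M, visitados):
--             fila_actual = siguiente_fila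
--             col_actual = siguiente_col
--
--         else:
--             direccion_actual = girar_derecha(direccion_actual)
--             (siguiente_fila_despues_giro, siguiente_col_despues_giro) = calcular_siguiente_paso(fila_actual, col_actual, direccion_actual)
--
--             fila_actual = siguiente_fila_despues_giro
--             col_actual = siguiente_col_despues_giro
--
--     return direccion_actual
-- ===== SOURCE B (Python) =====
-- def direccion_final(N, M):
--     # O(1) closed form: the spiral ends while sweeping along the smaller
--     # dimension's last line; only that dimension's parity matters.
--     if N <= 0 or M <= 0:
--         return "Dimensiones no válidas"
--     if N <= M:
--         return "DERECHA" if N % 2 == 1 else "IZQUIERDA"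
--     return "ABAJO" if M % 2 == 1 else "ARRIBA"
-- ===== Notes on version B (the rewrite author's own statement) =====
-- stated objective: faster
-- what changed: Replaces the O(N*M) cell-by-cell spiral simulation with a visited matrix by an O(1) closed form: the final heading depends only on which dimension is the smaller one and on its parity.
import Mathlib
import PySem

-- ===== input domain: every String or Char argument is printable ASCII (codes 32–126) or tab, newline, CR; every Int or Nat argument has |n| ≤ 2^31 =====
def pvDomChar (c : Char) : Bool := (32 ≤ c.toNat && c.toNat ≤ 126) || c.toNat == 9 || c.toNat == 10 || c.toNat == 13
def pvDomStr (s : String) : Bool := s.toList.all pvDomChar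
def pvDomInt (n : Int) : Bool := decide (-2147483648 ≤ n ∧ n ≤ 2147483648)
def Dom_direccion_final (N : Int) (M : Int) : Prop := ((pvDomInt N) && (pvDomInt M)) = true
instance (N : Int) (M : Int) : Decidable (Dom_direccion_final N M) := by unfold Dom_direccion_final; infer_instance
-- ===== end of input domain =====

-- B replaces A's O(N*M) spiral simulation by an O(1) parity closed form; equal return value proved for all inputs.

-- ===== PORT A =====
def matriz_vacia (filas : Int) (columnas : Int) : List (List Bool) :=
  (PySem.List.pyRange 0 filas 1).foldl
    (fun matriz _ =>
      matriz ++ [(PySem.List.pyRange 0 columnas 1).foldl (fun fila_nueva _ => fila_nueva ++ [false]) []])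
    []

-- Python's girar_derecha falls through (returns None) on any other string; ported as Option.
def girar_derecha (direccion_actual : String) : Option String :=
  if direccion_actual = "DERECHA" then some "ABAJO"
  else if direccion_actual = "ABAJO" then some "IZQUIERDA"
  else if direccion_actual = "IZQUIERDA" then some "ARRIBA"
  else if direccion_actual = "ARRIBA" then some "DERECHA"
  else none

def calcular_siguiente_paso (fila_actual : Int) (col_actual : Int) (direccion : String) : Int × Int :=
  if direccion = "DERECHA" then (fila_actual, col_actual + 1)
  else if direccion = "ABAJO" then (fila_actual + 1, col_actual)
  else if direccion = "IZQUIERDA" then (fila_actual, col_actual - 1)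
  else if direccion = "ARRIBA" then (fila_actual - 1, col_actual)
  else (fila_actual, col_actual)

def validacion (fila : Int) (col : Int) (max_filas : Int) (max_cols : Int) : Bool :=
  if fila < 0 ∨ fila ≥ max_filas then false
  else if col < 0 ∨ col ≥ max_cols then false
  else true

-- visitados[fila][col] read; exact on every state the loop reaches (indices are then in range and non-negative).
def leerV (visitados : List (List Bool)) (fila : Int) (col : Int) : Bool :=
  (PySem.List.pyGet? ((PySem.List.pyGet? visitados fila).getD []) col).getD false

def movimiento_valido (fila : Int) (col : Int) (max_filas : Int) (max_cols : Int)
    (visitados : List (List Bool)) : Bool :=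
  if ¬ (validacion fila col max_filas max_cols = true) then false
  else if leerV visitados fila col = true then false
  else true

-- visitados[fila][col] = True; exact on every state the loop reaches (0 ≤ fila < N, 0 ≤ col < M there).
def marcarV (visitados : List (List Bool)) (fila : Int) (col : Int) : List (List Bool) :=
  visitados.modify fila.toNat (fun row => row.set col.toNat true)

-- The while loop; fuel = total number of cells (the loop marks one new cell per iteration, proved below).
def bucle (N : Int) (M : Int) (total : Int) :
    Nat → List (List Bool) → Int → Int → String → Int → String
  | 0, _, _, _, direccion, _ => direccion
  | fuel+1, visitados, fila, col, direccion, cnt =>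
    if cnt < total then
      let visitados2 := if leerV visitados fila col = false then marcarV visitados fila col else visitados
      let cnt2 := if leerV visitados fila col = false then cnt + 1 else cnt
      if cnt2 = total then direccion
      else
        let sig := calcular_siguiente_paso fila col direccion
        if movimiento_valido sig.1 sig.2 N M visitados2 = true then
          bucle N M total fuel visitados2 sig.1 sig.2 direccion cnt2
        else
          -- direccion is always one of the four headings here, so girar_derecha is never none
          let dir2 := (girar_derecha direccion).getD ""
          let sig2 := calcular_siguiente_paso fila col dir2
          bucle N M total fuel visitados2 sig2.1 sig2.2 dir2 cnt2
    else direccion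

def direccion_final (N : Int) (M : Int) : String :=
  if N ≤ 0 ∨ M ≤ 0 then "Dimensiones no válidas"
  else bucle N M (N * M) (N * M).toNat (matriz_vacia N M) 0 0 "DERECHA" 0

-- ===== PORT B =====
def direccion_final_alt (N : Int) (M : Int) : String :=
  if N ≤ 0 ∨ M ≤ 0 then "Dimensiones no válidas"
  else if N ≤ M then (if N % 2 = 1 then "DERECHA" else "IZQUIERDA")
  else if M % 2 = 1 then "ABAJO" else "ARRIBA"

-- ===== PRECONDITION & SPEC =====
def Spec_direccion_final (N : Int) (M : Int) (out : String) : Prop := out = direccion_final_alt N M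
instance (N : Int) (M : Int) (out : String) : Decidable (Spec_direccion_final N M out) := by unfold Spec_direccion_final; infer_instance

-- ===== CLAIM (what is proved, stated in full; the proofs are below) =====
def Claim_equal_direccion_final : Prop := ∀ (N : Int) (M : Int), Dom_direccion_final N M → Spec_direccion_final N M (direccion_final N M)

-- ===== LEMMAS AND PROOFS =====

-- Closed-form answers for an n×m unvisited rectangle entered in each of the four headings.
def ansR (n m : Int) : String :=
  if n ≤ m then (if n % 2 = 1 then "DERECHA" else "IZQUIERDA")
  else (if m % 2 = 1 then "ABAJO" else "ARRIBA")
def ansAB (n m : Int) : String :=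
  if m ≤ n then (if m % 2 = 1 then "ABAJO" else "ARRIBA")
  else (if n % 2 = 1 then "IZQUIERDA" else "DERECHA")
def ansIZ (n m : Int) : String :=
  if n ≤ m then (if n % 2 = 1 then "IZQUIERDA" else "DERECHA")
  else (if m % 2 = 1 then "ARRIBA" else "ABAJO")
def ansAR (n m : Int) : String :=
  if m ≤ n then (if m % 2 = 1 then "ARRIBA" else "ABAJO")
  else (if n % 2 = 1 then "DERECHA" else "IZQUIERDA")

theorem bridgeR (n m : Int) (_hn : 2 ≤ n) (_hm : 1 ≤ m) : ansR n m = ansAB (n-1) m := by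
  unfold ansR ansAB; split_ifs <;> first | rfl | omega
theorem bridgeAB (n m : Int) (_hn : 1 ≤ n) (_hm : 2 ≤ m) : ansAB n m = ansIZ n (m-1) := by
  unfold ansAB ansIZ; split_ifs <;> first | rfl | omega
theorem bridgeIZ (n m : Int) (_hn : 2 ≤ n) (_hm : 1 ≤ m) : ansIZ n m = ansAR (n-1) m := by
  unfold ansIZ ansAR; split_ifs <;> first | rfl | omega
theorem bridgeAR (n m : Int) (_hn : 1 ≤ n) (_hm : 2 ≤ m) : ansAR n m = ansR n (m-1) := by
  unfold ansAR ansR; split_ifs <;> first | rfl | omega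

theorem foldl_append_singleton {α β : Type} (l : List α) (x : β) (acc : List β) :
    l.foldl (fun m _ => m ++ [x]) acc = acc ++ List.replicate l.length x := by
  induction l generalizing acc with
  | nil => simp
  | cons a l ih => simp [List.foldl, ih, List.replicate_succ]

theorem matriz_vacia_eq (f c : Int) :
    matriz_vacia f c = List.replicate f.toNat (List.replicate c.toNat false) := by
  unfold matriz_vacia
  rw [foldl_append_singleton, foldl_append_singleton]
  simp [PySem.List.length_pyRange_one]

def inRect (a b n m i j : Int) : Prop := a ≤ i ∧ i < a + n ∧ b ≤ j ∧ j < b + m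

-- vis is an N×M matrix whose true entries on the grid are exactly P.
def VisRep (N M : Int) (vis : List (List Bool)) (P : Int → Int → Prop) : Prop :=
  vis.length = N.toNat ∧ (∀ (k : Nat) (h : k < vis.length), vis[k].length = M.toNat) ∧
  ∀ i j : Int, 0 ≤ i → i < N → 0 ≤ j → j < M → (leerV vis i j = true ↔ P i j)

theorem visRep_congr {N M : Int} {vis : List (List Bool)} {P Q : Int → Int → Prop}
    (h : VisRep N M vis P)
    (hpq : ∀ i j : Int, 0 ≤ i → i < N → 0 ≤ j → j < M → (P i j ↔ Q i j)) :
    VisRep N M vis Q := by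
  refine ⟨h.1, h.2.1, fun i j h1 h2 h3 h4 => ?_⟩
  rw [h.2.2 i j h1 h2 h3 h4, hpq i j h1 h2 h3 h4]

theorem leerV_eq' (vis : List (List Bool)) (i j : Int) (hi : 0 ≤ i) (hj : 0 ≤ j) :
    leerV vis i j = (((vis[i.toNat]?).getD [])[j.toNat]?).getD false := by
  unfold leerV
  rw [PySem.List.pyGet?_of_nonneg vis hi, PySem.List.pyGet?_of_nonneg _ hj]

theorem leerV_eq (vis : List (List Bool)) (i j : Int) (hi : 0 ≤ i) (hj : 0 ≤ j)
    (hlen : i.toNat < vis.length) (hrow : j.toNat < (vis[i.toNat]).length) :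
    leerV vis i j = vis[i.toNat][j.toNat] := by
  rw [leerV_eq' vis i j hi hj, List.getElem?_eq_getElem hlen]
  simp only [Option.getD_some]
  rw [List.getElem?_eq_getElem hrow]
  rfl

theorem visRep_empty (N M : Int) (hN : 1 ≤ N) (hM : 1 ≤ M) :
    VisRep N M (matriz_vacia N M) (fun _ _ => False) := by
  rw [matriz_vacia_eq]
  refine ⟨by simp, by simp, fun i j h1 h2 h3 h4 => ?_⟩
  rw [leerV_eq _ i j h1 h3 (by simp; omega) (by simp; omega)]
  simp

theorem visRep_mark {N M : Int} {vis : List (List Bool)} {P : Int → Int → Prop}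
    (h : VisRep N M vis P) (r c : Int) (hr : 0 ≤ r) (hrN : r < N) (hc : 0 ≤ c) (hcM : c < M) :
    VisRep N M (marcarV vis r c) (fun i j => P i j ∨ (i = r ∧ j = c)) := by
  obtain ⟨hlen, hrows, hread⟩ := h
  refine ⟨by simpa [marcarV] using hlen, ?_, ?_⟩
  · intro k hk
    simp only [marcarV, List.getElem_modify]
    split
    · rw [List.length_set]; exact hrows k (by simpa [marcarV] using hk)
    · exact hrows k (by simpa [marcarV] using hk)
  · intro i j h1 h2 h3 h4
    have hilt : i.toNat < vis.length := by rw [hlen]; omega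
    have hjlt : j.toNat < (vis[i.toNat]).length := by rw [hrows i.toNat hilt]; omega
    have hbase := hread i j h1 h2 h3 h4
    rw [leerV_eq vis i j h1 h3 hilt hjlt] at hbase
    rw [leerV_eq' _ i j h1 h3]
    have hrowi : vis[i.toNat]? = some vis[i.toNat] := List.getElem?_eq_getElem hilt
    simp only [marcarV, List.getElem?_modify, hrowi, Option.map_eq_map, Option.map_some,
      Option.getD_some]
    by_cases hir : i = r
    · rw [if_pos (by omega : r.toNat = i.toNat)]
      rw [List.getElem?_set]
      by_cases hjc : j = c
      · rw [if_pos (by omega : c.toNat = j.toNat),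
          if_pos (by rw [show c.toNat = j.toNat by omega]; exact hjlt)]
        simp only [Option.getD_some]
        constructor
        · intro _; exact Or.inr ⟨hir, hjc⟩
        · intro _; trivial
      · rw [if_neg (by omega : ¬ c.toNat = j.toNat), List.getElem?_eq_getElem hjlt]
        simp only [Option.getD_some]
        rw [hbase]
        constructor
        · exact Or.inl
        · rintro (hp | ⟨_, hj⟩)
          · exact hp
          · exact absurd hj hjc
    · rw [if_neg (by omega : ¬ r.toNat = i.toNat), List.getElem?_eq_getElem hjlt]
      simp only [Option.getD_some]
      rw [hbase]
      constructor
      · exact Or.inl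
      · rintro (hp | ⟨hi', _⟩)
        · exact hp
        · exact absurd hi' hir

-- The four phase invariants for the main-loop induction.
def PhR (fuel : Nat) : Prop := ∀ (N M a b n m c cnt : Int) (vis : List (List Bool)),
  0 ≤ a → a + n ≤ N → 0 ≤ b → b + m ≤ M → 1 ≤ n → 1 ≤ m → b ≤ c → c ≤ b + m - 1 →
  VisRep N M vis (fun i j => ¬ inRect a b n m i j ∨ (i = a ∧ b ≤ j ∧ j < c)) →
  cnt = N * M - (n * m - (c - b)) → (fuel : Int) = n * m - (c - b) →
  bucle N M (N * M) fuel vis a c "DERECHA" cnt = ansR n m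

def PhAB (fuel : Nat) : Prop := ∀ (N M a b n m r cnt : Int) (vis : List (List Bool)),
  0 ≤ a → a + n ≤ N → 0 ≤ b → b + m ≤ M → 1 ≤ n → 1 ≤ m → a ≤ r → r ≤ a + n - 1 →
  VisRep N M vis (fun i j => ¬ inRect a b n m i j ∨ (j = b + m - 1 ∧ a ≤ i ∧ i < r)) →
  cnt = N * M - (n * m - (r - a)) → (fuel : Int) = n * m - (r - a) →
  bucle N M (N * M) fuel vis r (b + m - 1) "ABAJO" cnt = ansAB n m

def PhIZ (fuel : Nat) : Prop := ∀ (N M a b n m c cnt : Int) (vis : List (List Bool)),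
  0 ≤ a → a + n ≤ N → 0 ≤ b → b + m ≤ M → 1 ≤ n → 1 ≤ m → b ≤ c → c ≤ b + m - 1 →
  VisRep N M vis (fun i j => ¬ inRect a b n m i j ∨ (i = a + n - 1 ∧ c < j ∧ j < b + m)) →
  cnt = N * M - (n * m - (b + m - 1 - c)) → (fuel : Int) = n * m - (b + m - 1 - c) →
  bucle N M (N * M) fuel vis (a + n - 1) c "IZQUIERDA" cnt = ansIZ n m

def PhAR (fuel : Nat) : Prop := ∀ (N M a b n m r cnt : Int) (vis : List (List Bool)),
  0 ≤ a → a + n ≤ N → 0 ≤ b → b + m ≤ M → 1 ≤ n → 1 ≤ m → a ≤ r → r ≤ a + n - 1 →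
  VisRep N M vis (fun i j => ¬ inRect a b n m i j ∨ (j = b ∧ r < i ∧ i < a + n)) →
  cnt = N * M - (n * m - (a + n - 1 - r)) → (fuel : Int) = n * m - (a + n - 1 - r) →
  bucle N M (N * M) fuel vis r b "ARRIBA" cnt = ansAR n m

theorem master : ∀ fuel : Nat, PhR fuel ∧ PhAB fuel ∧ PhIZ fuel ∧ PhAR fuel := by
  intro fuel
  induction fuel using Nat.strong_induction_on with
  | _ fuel IH =>
  refine ⟨?_, ?_, ?_, ?_⟩
  · -- phase DERECHA: position (a, c), marked = complement of rect plus top-row prefix [b, c)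
    intro N M a b n m c cnt vis ha haN hb hbM hn hm hbc hcm hvis hcnt hfuel
    have hmn : m ≤ n * m := le_mul_of_one_le_left (by omega) hn
    have hu1 : 1 ≤ n * m - (c - b) := by omega
    obtain ⟨f, rfl⟩ : ∃ f, fuel = f + 1 := ⟨fuel - 1, by omega⟩
    have hleer : leerV vis a c = false := by
      rcases Bool.eq_false_or_eq_true (leerV vis a c) with hb' | hb'
      · exfalso
        rcases (hvis.2.2 a c (by omega) (by omega) (by omega) (by omega)).mp hb' with hni | ⟨_, _, hlt⟩
        · exact hni (by unfold inRect; omega)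
        · omega
      · exact hb'
    have hvis2 := visRep_mark hvis a c (by omega) (by omega) (by omega) (by omega)
    simp only [bucle, hleer, if_true]
    rw [if_pos (show cnt < N * M by omega)]
    by_cases hfin : cnt + 1 = N * M
    · rw [if_pos hfin]
      have hfix : n = 1 := by
        by_contra hne
        have h2 : 2 * m ≤ n * m := mul_le_mul_of_nonneg_right (by omega : (2:Int) ≤ n) (by omega)
        omega
      unfold ansR
      rw [if_pos (by omega), if_pos (by omega)]
    · rw [if_neg hfin]
      have hs1 : (calcular_siguiente_paso a c "DERECHA").1 = a := by
        simp [calcular_siguiente_paso]; try omega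
      have hs2 : (calcular_siguiente_paso a c "DERECHA").2 = (c + 1) := by
        simp [calcular_siguiente_paso]; try omega
      rw [hs1, hs2]
      by_cases hend : c = b + m - 1
      · subst hend
        have hsec : 2 ≤ n := by
          rcases (by omega : n = 1 ∨ 2 ≤ n) with h1 | h2
          · exfalso; rw [h1, one_mul] at hcnt; omega
          · exact h2
        have hmv : movimiento_valido a (b + m) N M (marcarV vis a (b + m - 1)) = false := by
          by_cases hedge : b + m = M
          · have hval : validacion a (b + m) N M = false := by
              unfold validacion
              rw [if_neg (by omega), if_pos (by omega)]
            unfold movimiento_valido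
            rw [if_pos (by simp [hval])]
          · have hval : validacion a (b + m) N M = true := by
              unfold validacion
              rw [if_neg (by omega), if_neg (by omega)]
            unfold movimiento_valido
            rw [if_neg (by simp [hval])]
            rw [if_pos ((hvis2.2.2 a (b + m) (by omega) (by omega) (by omega)
              (by omega)).mpr (Or.inl (Or.inl (by unfold inRect; omega))))]
        rw [if_neg (by simp [hmv])]
        have hgir : (girar_derecha "DERECHA").getD "" = "ABAJO" := rfl
        rw [hgir]
        have ht1 : (calcular_siguiente_paso a (b + m - 1) "ABAJO").1 = (a + 1) := by
          simp [calcular_siguiente_paso]; try omega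
        have ht2 : (calcular_siguiente_paso a (b + m - 1) "ABAJO").2 = (b + m - 1) := by
          simp [calcular_siguiente_paso]; try omega
        rw [ht1, ht2]
        rw [bridgeR n m hsec hm]
        have hdist : (n - 1) * m = n * m - m := by ring
        refine (IH f (by omega)).2.1 N M (a + 1) b (n - 1) m (a + 1) (cnt + 1)
          (marcarV vis a (b + m - 1)) (by omega) (by omega) (by omega) (by omega)
          (by omega) (by omega) (by omega) (by omega) ?_ (by omega) (by push_cast at hfuel ⊢; omega)
        refine visRep_congr hvis2 ?_
        intro i j h1 h2 h3 h4
        unfold inRect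
        omega
      · have hval : validacion a (c + 1) N M = true := by
          unfold validacion
          rw [if_neg (by omega), if_neg (by omega)]
        have hl2 : leerV (marcarV vis a c) a (c + 1) = false := by
          rcases Bool.eq_false_or_eq_true (leerV (marcarV vis a c) a (c + 1)) with hb' | hb'
          · exfalso
            rcases (hvis2.2.2 a (c + 1) (by omega) (by omega) (by omega) (by omega)).mp hb' with
              (hni | ⟨_, _, hlt⟩) | ⟨_, hceq⟩
            · exact hni (by unfold inRect; omega)
            · omega
            · omega
          · exact hb'
        have hmv : movimiento_valido a (c + 1) N M (marcarV vis a c) = true := by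
          unfold movimiento_valido
          rw [if_neg (by simp [hval])]
          rw [if_neg (by simp [hl2])]
        rw [if_pos hmv]
        refine (IH f (by omega)).1 N M a b n m (c + 1) (cnt + 1) (marcarV vis a c)
          (by omega) (by omega) (by omega) (by omega) (by omega) (by omega) (by omega)
          (by omega) ?_ (by omega) (by push_cast at hfuel ⊢; omega)
        refine visRep_congr hvis2 ?_
        intro i j h1 h2 h3 h4
        unfold inRect
        omega
  · -- phase ABAJO: position (r, b+m-1), marked = complement of rect plus right-column prefix [a, r)
    intro N M a b n m r cnt vis ha haN hb hbM hn hm har hrn hvis hcnt hfuel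
    have hmn : n ≤ n * m := le_mul_of_one_le_right (by omega) hm
    have hu1 : 1 ≤ n * m - (r - a) := by omega
    obtain ⟨f, rfl⟩ : ∃ f, fuel = f + 1 := ⟨fuel - 1, by omega⟩
    have hleer : leerV vis r (b + m - 1) = false := by
      rcases Bool.eq_false_or_eq_true (leerV vis r (b + m - 1)) with hb' | hb'
      · exfalso
        rcases (hvis.2.2 r (b + m - 1) (by omega) (by omega) (by omega) (by omega)).mp hb' with hni | ⟨_, _, hlt⟩
        · exact hni (by unfold inRect; omega)
        · omega
      · exact hb'
    have hvis2 := visRep_mark hvis r (b + m - 1) (by omega) (by omega) (by omega) (by omega)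
    simp only [bucle, hleer, if_true]
    rw [if_pos (show cnt < N * M by omega)]
    by_cases hfin : cnt + 1 = N * M
    · rw [if_pos hfin]
      have hfix : m = 1 := by
        by_contra hne
        have h2 : n * 2 ≤ n * m := mul_le_mul_of_nonneg_left (by omega : (2:Int) ≤ m) (by omega)
        omega
      unfold ansAB
      rw [if_pos (by omega), if_pos (by omega)]
    · rw [if_neg hfin]
      have hs1 : (calcular_siguiente_paso r (b + m - 1) "ABAJO").1 = (r + 1) := by
        simp [calcular_siguiente_paso]; try omega
      have hs2 : (calcular_siguiente_paso r (b + m - 1) "ABAJO").2 = (b + m - 1) := by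
        simp [calcular_siguiente_paso]; try omega
      rw [hs1, hs2]
      by_cases hend : r = a + n - 1
      · subst hend
        have hsec : 2 ≤ m := by
          rcases (by omega : m = 1 ∨ 2 ≤ m) with h1 | h2
          · exfalso; rw [h1, mul_one] at hcnt; omega
          · exact h2
        have hmv : movimiento_valido (a + n) (b + m - 1) N M (marcarV vis (a + n - 1) (b + m - 1)) = false := by
          by_cases hedge : a + n = N
          · have hval : validacion (a + n) (b + m - 1) N M = false := by
              unfold validacion
              rw [if_pos (by omega)]
            unfold movimiento_valido
            rw [if_pos (by simp [hval])]
          · have hval : validacion (a + n) (b + m - 1) N M = true := by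
              unfold validacion
              rw [if_neg (by omega), if_neg (by omega)]
            unfold movimiento_valido
            rw [if_neg (by simp [hval])]
            rw [if_pos ((hvis2.2.2 (a + n) (b + m - 1) (by omega) (by omega) (by omega)
              (by omega)).mpr (Or.inl (Or.inl (by unfold inRect; omega))))]
        rw [if_neg (by simp [hmv])]
        have hgir : (girar_derecha "ABAJO").getD "" = "IZQUIERDA" := rfl
        rw [hgir]
        have ht1 : (calcular_siguiente_paso (a + n - 1) (b + m - 1) "IZQUIERDA").1 = (a + n - 1) := by
          simp [calcular_siguiente_paso]; try omega
        have ht2 : (calcular_siguiente_paso (a + n - 1) (b + m - 1) "IZQUIERDA").2 = (b + m - 2) := by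
          simp [calcular_siguiente_paso]; try omega
        rw [ht1, ht2]
        rw [bridgeAB n m hn hsec]
        have hdist : n * (m - 1) = n * m - n := by ring
        refine (IH f (by omega)).2.2.1 N M a b n (m - 1) (b + m - 2) (cnt + 1)
          (marcarV vis (a + n - 1) (b + m - 1)) (by omega) (by omega) (by omega) (by omega)
          (by omega) (by omega) (by omega) (by omega) ?_ (by omega) (by push_cast at hfuel ⊢; omega)
        refine visRep_congr hvis2 ?_
        intro i j h1 h2 h3 h4
        unfold inRect
        omega
      · have hval : validacion (r + 1) (b + m - 1) N M = true := by
          unfold validacion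
          rw [if_neg (by omega), if_neg (by omega)]
        have hl2 : leerV (marcarV vis r (b + m - 1)) (r + 1) (b + m - 1) = false := by
          rcases Bool.eq_false_or_eq_true (leerV (marcarV vis r (b + m - 1)) (r + 1) (b + m - 1)) with hb' | hb'
          · exfalso
            rcases (hvis2.2.2 (r + 1) (b + m - 1) (by omega) (by omega) (by omega) (by omega)).mp hb' with
              (hni | ⟨_, _, hlt⟩) | ⟨hre, _⟩
            · exact hni (by unfold inRect; omega)
            · omega
            · omega
          · exact hb'
        have hmv : movimiento_valido (r + 1) (b + m - 1) N M (marcarV vis r (b + m - 1)) = true := by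
          unfold movimiento_valido
          rw [if_neg (by simp [hval])]
          rw [if_neg (by simp [hl2])]
        rw [if_pos hmv]
        refine (IH f (by omega)).2.1 N M a b n m (r + 1) (cnt + 1) (marcarV vis r (b + m - 1))
          (by omega) (by omega) (by omega) (by omega) (by omega) (by omega) (by omega)
          (by omega) ?_ (by omega) (by push_cast at hfuel ⊢; omega)
        refine visRep_congr hvis2 ?_
        intro i j h1 h2 h3 h4
        unfold inRect
        omega
  · -- phase IZQUIERDA: position (a+n-1, c), marked = complement of rect plus bottom-row suffix (c, b+m)
    intro N M a b n m c cnt vis ha haN hb hbM hn hm hbc hcm hvis hcnt hfuel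
    have hmn : m ≤ n * m := le_mul_of_one_le_left (by omega) hn
    have hu1 : 1 ≤ n * m - (b + m - 1 - c) := by omega
    obtain ⟨f, rfl⟩ : ∃ f, fuel = f + 1 := ⟨fuel - 1, by omega⟩
    have hleer : leerV vis (a + n - 1) c = false := by
      rcases Bool.eq_false_or_eq_true (leerV vis (a + n - 1) c) with hb' | hb'
      · exfalso
        rcases (hvis.2.2 (a + n - 1) c (by omega) (by omega) (by omega) (by omega)).mp hb' with hni | ⟨_, hlt, _⟩
        · exact hni (by unfold inRect; omega)
        · omega
      · exact hb'
    have hvis2 := visRep_mark hvis (a + n - 1) c (by omega) (by omega) (by omega) (by omega)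
    simp only [bucle, hleer, if_true]
    rw [if_pos (show cnt < N * M by omega)]
    by_cases hfin : cnt + 1 = N * M
    · rw [if_pos hfin]
      have hfix : n = 1 := by
        by_contra hne
        have h2 : 2 * m ≤ n * m := mul_le_mul_of_nonneg_right (by omega : (2:Int) ≤ n) (by omega)
        omega
      unfold ansIZ
      rw [if_pos (by omega), if_pos (by omega)]
    · rw [if_neg hfin]
      have hs1 : (calcular_siguiente_paso (a + n - 1) c "IZQUIERDA").1 = (a + n - 1) := by
        simp [calcular_siguiente_paso]; try omega
      have hs2 : (calcular_siguiente_paso (a + n - 1) c "IZQUIERDA").2 = (c - 1) := by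
        simp [calcular_siguiente_paso]; try omega
      rw [hs1, hs2]
      by_cases hend : b = c
      · subst hend
        have hsec : 2 ≤ n := by
          rcases (by omega : n = 1 ∨ 2 ≤ n) with h1 | h2
          · exfalso; rw [h1, one_mul] at hcnt; omega
          · exact h2
        have hmv : movimiento_valido (a + n - 1) (b - 1) N M (marcarV vis (a + n - 1) b) = false := by
          by_cases hedge : b = 0
          · have hval : validacion (a + n - 1) (b - 1) N M = false := by
              unfold validacion
              rw [if_neg (by omega), if_pos (by omega)]
            unfold movimiento_valido
            rw [if_pos (by simp [hval])]
          · have hval : validacion (a + n - 1) (b - 1) N M = true := by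
              unfold validacion
              rw [if_neg (by omega), if_neg (by omega)]
            unfold movimiento_valido
            rw [if_neg (by simp [hval])]
            rw [if_pos ((hvis2.2.2 (a + n - 1) (b - 1) (by omega) (by omega) (by omega)
              (by omega)).mpr (Or.inl (Or.inl (by unfold inRect; omega))))]
        rw [if_neg (by simp [hmv])]
        have hgir : (girar_derecha "IZQUIERDA").getD "" = "ARRIBA" := rfl
        rw [hgir]
        have ht1 : (calcular_siguiente_paso (a + n - 1) b "ARRIBA").1 = (a + n - 2) := by
          simp [calcular_siguiente_paso]; try omega
        have ht2 : (calcular_siguiente_paso (a + n - 1) b "ARRIBA").2 = b := by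
          simp [calcular_siguiente_paso]; try omega
        rw [ht1, ht2]
        rw [bridgeIZ n m hsec hm]
        have hdist : (n - 1) * m = n * m - m := by ring
        refine (IH f (by omega)).2.2.2 N M a b (n - 1) m (a + n - 2) (cnt + 1)
          (marcarV vis (a + n - 1) b) (by omega) (by omega) (by omega) (by omega)
          (by omega) (by omega) (by omega) (by omega) ?_ (by omega) (by push_cast at hfuel ⊢; omega)
        refine visRep_congr hvis2 ?_
        intro i j h1 h2 h3 h4
        unfold inRect
        omega
      · have hval : validacion (a + n - 1) (c - 1) N M = true := by
          unfold validacion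
          rw [if_neg (by omega), if_neg (by omega)]
        have hl2 : leerV (marcarV vis (a + n - 1) c) (a + n - 1) (c - 1) = false := by
          rcases Bool.eq_false_or_eq_true (leerV (marcarV vis (a + n - 1) c) (a + n - 1) (c - 1)) with hb' | hb'
          · exfalso
            rcases (hvis2.2.2 (a + n - 1) (c - 1) (by omega) (by omega) (by omega) (by omega)).mp hb' with
              (hni | ⟨_, hlt, _⟩) | ⟨_, hce⟩
            · exact hni (by unfold inRect; omega)
            · omega
            · omega
          · exact hb'
        have hmv : movimiento_valido (a + n - 1) (c - 1) N M (marcarV vis (a + n - 1) c) = true := by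
          unfold movimiento_valido
          rw [if_neg (by simp [hval])]
          rw [if_neg (by simp [hl2])]
        rw [if_pos hmv]
        refine (IH f (by omega)).2.2.1 N M a b n m (c - 1) (cnt + 1) (marcarV vis (a + n - 1) c)
          (by omega) (by omega) (by omega) (by omega) (by omega) (by omega) (by omega)
          (by omega) ?_ (by omega) (by push_cast at hfuel ⊢; omega)
        refine visRep_congr hvis2 ?_
        intro i j h1 h2 h3 h4
        unfold inRect
        omega
  · -- phase ARRIBA: position (r, b), marked = complement of rect plus left-column suffix (r, a+n)
    intro N M a b n m r cnt vis ha haN hb hbM hn hm har hrn hvis hcnt hfuel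
    have hmn : n ≤ n * m := le_mul_of_one_le_right (by omega) hm
    have hu1 : 1 ≤ n * m - (a + n - 1 - r) := by omega
    obtain ⟨f, rfl⟩ : ∃ f, fuel = f + 1 := ⟨fuel - 1, by omega⟩
    have hleer : leerV vis r b = false := by
      rcases Bool.eq_false_or_eq_true (leerV vis r b) with hb' | hb'
      · exfalso
        rcases (hvis.2.2 r b (by omega) (by omega) (by omega) (by omega)).mp hb' with hni | ⟨_, hlt, _⟩
        · exact hni (by unfold inRect; omega)
        · omega
      · exact hb'
    have hvis2 := visRep_mark hvis r b (by omega) (by omega) (by omega) (by omega)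
    simp only [bucle, hleer, if_true]
    rw [if_pos (show cnt < N * M by omega)]
    by_cases hfin : cnt + 1 = N * M
    · rw [if_pos hfin]
      have hfix : m = 1 := by
        by_contra hne
        have h2 : n * 2 ≤ n * m := mul_le_mul_of_nonneg_left (by omega : (2:Int) ≤ m) (by omega)
        omega
      unfold ansAR
      rw [if_pos (by omega), if_pos (by omega)]
    · rw [if_neg hfin]
      have hs1 : (calcular_siguiente_paso r b "ARRIBA").1 = (r - 1) := by
        simp [calcular_siguiente_paso]; try omega
      have hs2 : (calcular_siguiente_paso r b "ARRIBA").2 = b := by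
        simp [calcular_siguiente_paso]; try omega
      rw [hs1, hs2]
      by_cases hend : a = r
      · subst hend
        have hsec : 2 ≤ m := by
          rcases (by omega : m = 1 ∨ 2 ≤ m) with h1 | h2
          · exfalso; rw [h1, mul_one] at hcnt; omega
          · exact h2
        have hmv : movimiento_valido (a - 1) b N M (marcarV vis a b) = false := by
          by_cases hedge : a = 0
          · have hval : validacion (a - 1) b N M = false := by
              unfold validacion
              rw [if_pos (by omega)]
            unfold movimiento_valido
            rw [if_pos (by simp [hval])]
          · have hval : validacion (a - 1) b N M = true := by
              unfold validacion
              rw [if_neg (by omega), if_neg (by omega)]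
            unfold movimiento_valido
            rw [if_neg (by simp [hval])]
            rw [if_pos ((hvis2.2.2 (a - 1) b (by omega) (by omega) (by omega)
              (by omega)).mpr (Or.inl (Or.inl (by unfold inRect; omega))))]
        rw [if_neg (by simp [hmv])]
        have hgir : (girar_derecha "ARRIBA").getD "" = "DERECHA" := rfl
        rw [hgir]
        have ht1 : (calcular_siguiente_paso a b "DERECHA").1 = a := by
          simp [calcular_siguiente_paso]; try omega
        have ht2 : (calcular_siguiente_paso a b "DERECHA").2 = (b + 1) := by
          simp [calcular_siguiente_paso]; try omega
        rw [ht1, ht2]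
        rw [bridgeAR n m hn hsec]
        have hdist : n * (m - 1) = n * m - n := by ring
        refine (IH f (by omega)).1 N M a (b + 1) n (m - 1) (b + 1) (cnt + 1)
          (marcarV vis a b) (by omega) (by omega) (by omega) (by omega)
          (by omega) (by omega) (by omega) (by omega) ?_ (by omega) (by push_cast at hfuel ⊢; omega)
        refine visRep_congr hvis2 ?_
        intro i j h1 h2 h3 h4
        unfold inRect
        omega
      · have hval : validacion (r - 1) b N M = true := by
          unfold validacion
          rw [if_neg (by omega), if_neg (by omega)]
        have hl2 : leerV (marcarV vis r b) (r - 1) b = false := by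
          rcases Bool.eq_false_or_eq_true (leerV (marcarV vis r b) (r - 1) b) with hb' | hb'
          · exfalso
            rcases (hvis2.2.2 (r - 1) b (by omega) (by omega) (by omega) (by omega)).mp hb' with
              (hni | ⟨_, hlt, _⟩) | ⟨hre, _⟩
            · exact hni (by unfold inRect; omega)
            · omega
            · omega
          · exact hb'
        have hmv : movimiento_valido (r - 1) b N M (marcarV vis r b) = true := by
          unfold movimiento_valido
          rw [if_neg (by simp [hval])]
          rw [if_neg (by simp [hl2])]
        rw [if_pos hmv]
        refine (IH f (by omega)).2.2.2 N M a b n m (r - 1) (cnt + 1) (marcarV vis r b)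
          (by omega) (by omega) (by omega) (by omega) (by omega) (by omega) (by omega)
          (by omega) ?_ (by omega) (by push_cast at hfuel ⊢; omega)
        refine visRep_congr hvis2 ?_
        intro i j h1 h2 h3 h4
        unfold inRect
        omega

-- ===== VERDICT (by name: the statement is the Claim_ definition above) =====
theorem direccion_final_spec : Claim_equal_direccion_final := by
  unfold Claim_equal_direccion_final Spec_direccion_final
  intro N M _
  unfold direccion_final direccion_final_alt
  by_cases h : N ≤ 0 ∨ M ≤ 0
  · rw [if_pos h, if_pos h]
  · rw [if_neg h, if_neg h]
    rw [not_or] at h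
    simp only [not_le] at h
    obtain ⟨hN, hM⟩ := h
    have hrep : VisRep N M (matriz_vacia N M)
        (fun i j => ¬ inRect 0 0 N M i j ∨ (i = 0 ∧ 0 ≤ j ∧ j < 0)) := by
      refine visRep_congr (visRep_empty N M (by omega) (by omega)) ?_
      intro i j h1 h2 h3 h4
      constructor
      · intro hf; exact absurd hf (by simp)
      · rintro (hni | ⟨_, _, hj⟩)
        · exact hni ⟨by omega, by omega, by omega, by omega⟩
        · omega
    have hNM : 0 ≤ N * M := by positivity
    have hmain := (master (N * M).toNat).1 N M 0 0 N M 0 0 (matriz_vacia N M)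
      (by omega) (by omega) (by omega) (by omega) (by omega) (by omega) (by omega)
      (by omega) hrep (by omega) (by omega)
    rw [hmain]
    unfold ansR
    rfl
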